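-- pv_equiv track=rewrite | github.com/picosdh/codetree-TILs | 240923/삼 오 무/three-five-moo.py | find_nth_number
-- ===== SOURCE A (Python) =====
-- def find_nth_number(N):
--     count = 0
--     num = 1
--
--     while True:
--         if num % 3 != 0 and num % 5 != 0:
--             count += 1
--             if count == N:
--                 return num
--         num += 1
-- ===== SOURCE B (Python) =====
-- def find_nth_number(N):
--     # Closed form: every block of 15 consecutive integers contains exactly 8
--     # numbers divisible by neither 3 nor 5, at fixed offsets within the block.
--     offsets = [1, 2, 4, 7, 8, 11, 13, 14]
--     k = N - 1
--     return 15 * (k // 8) + offsets[k % 8]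
-- ===== Notes on version B (the rewrite author's own statement) =====
-- stated objective: faster
-- what changed: Replaces the counting while-loop with an O(1) closed form: 8 valid numbers per period of 15, indexed by a fixed offset table.
import Mathlib
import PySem

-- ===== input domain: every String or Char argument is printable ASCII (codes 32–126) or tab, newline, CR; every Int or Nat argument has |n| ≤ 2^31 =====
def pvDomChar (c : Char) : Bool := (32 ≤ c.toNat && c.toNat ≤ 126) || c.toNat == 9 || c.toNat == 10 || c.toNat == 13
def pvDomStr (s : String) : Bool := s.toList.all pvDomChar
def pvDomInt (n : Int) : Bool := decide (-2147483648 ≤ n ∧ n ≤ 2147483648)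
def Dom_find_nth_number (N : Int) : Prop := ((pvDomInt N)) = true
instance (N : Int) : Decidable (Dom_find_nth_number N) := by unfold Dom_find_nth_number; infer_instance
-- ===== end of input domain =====

-- B replaces A's O(N) counting while-loop with an O(1) period-15 closed form (8 valid numbers per 15, fixed offsets).

-- ===== PORT A =====
-- A's `while True` loop, one recursive call per `num += 1`; the fuel argument only
-- makes the recursion total (15*N.toNat + 15 steps are proved sufficient below) and
-- never changes the computed value on inputs satisfying Pre_.
def pvLoopA (N : Int) : Nat → Int → Int → Int
  | 0, _, _ => 0  -- unreachable when 1 ≤ N (proved below)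
  | fuel + 1, count, num =>
    if PySem.Int.mod num 3 ≠ 0 ∧ PySem.Int.mod num 5 ≠ 0 then
      if count + 1 = N then num
      else pvLoopA N fuel (count + 1) (num + 1)
    else pvLoopA N fuel count (num + 1)

def find_nth_number (N : Int) : Int := pvLoopA N (15 * N.toNat + 15) 0 1

-- ===== PORT B =====
def find_nth_number_alt (N : Int) : Int :=
  let offsets : List Int := [1, 2, 4, 7, 8, 11, 13, 14]
  let k := N - 1
  -- offsets[k % 8]: k % 8 is always in [0, 8), so the lookup never raises; getD 0 is never taken
  15 * PySem.Int.floordiv k 8 + (PySem.List.pyGet? offsets (PySem.Int.mod k 8)).getD 0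

-- ===== PRECONDITION & SPEC =====
-- Pre_ excludes exactly N ≤ 0, on which the Python A never returns (infinite loop).
def Pre_find_nth_number (N : Int) : Prop := 1 ≤ N
instance (N : Int) : Decidable (Pre_find_nth_number N) := by unfold Pre_find_nth_number; infer_instance
def pvWitness_find_nth_number : Int := 3

def Spec_find_nth_number (N : Int) (out : Int) : Prop := out = find_nth_number_alt N
instance (N : Int) (out : Int) : Decidable (Spec_find_nth_number N out) := by unfold Spec_find_nth_number; infer_instance

-- ===== CLAIM (what is proved, stated in full; the proofs are below) =====
def Claim_equal_find_nth_number : Prop := ∀ (N : Int), Dom_find_nth_number N → Pre_find_nth_number N → Spec_find_nth_number N (find_nth_number N)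

-- ===== LEMMAS AND PROOFS =====

theorem pvLoopA_succ (N : Int) (fuel : Nat) (count num : Int) :
    pvLoopA N (fuel + 1) count num =
      if PySem.Int.mod num 3 ≠ 0 ∧ PySem.Int.mod num 5 ≠ 0 then
        if count + 1 = N then num else pvLoopA N fuel (count + 1) (num + 1)
      else pvLoopA N fuel count (num + 1) := rfl

theorem pvStepT (N : Int) (fuel : Nat) (count num : Int)
    (h3 : num % 3 ≠ 0) (h5 : num % 5 ≠ 0) :
    pvLoopA N (fuel + 1) count num =
      if count + 1 = N then num else pvLoopA N fuel (count + 1) (num + 1) := by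
  rw [pvLoopA_succ, if_pos]
  constructor
  · rw [PySem.Int.mod_eq_emod_of_pos (by norm_num)]; exact h3
  · rw [PySem.Int.mod_eq_emod_of_pos (by norm_num)]; exact h5

theorem pvStepF (N : Int) (fuel : Nat) (count num : Int)
    (h : num % 3 = 0 ∨ num % 5 = 0) :
    pvLoopA N (fuel + 1) count num = pvLoopA N fuel count (num + 1) := by
  rw [pvLoopA_succ, if_neg]
  rintro ⟨h3, h5⟩
  rw [PySem.Int.mod_eq_emod_of_pos (by norm_num)] at h3
  rw [PySem.Int.mod_eq_emod_of_pos (by norm_num)] at h5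
  rcases h with h | h
  · exact h3 h
  · exact h5 h

-- one period of 15 consecutive numbers, starting at 15*j + 1
theorem pvLoopA_period (N : Int) (fuel : Nat) (j count : Int) :
    pvLoopA N (fuel + 15) count (15 * j + 1) =
      if count + 1 = N then 15 * j + 1
      else if count + 2 = N then 15 * j + 2
      else if count + 3 = N then 15 * j + 4
      else if count + 4 = N then 15 * j + 7
      else if count + 5 = N then 15 * j + 8
      else if count + 6 = N then 15 * j + 11
      else if count + 7 = N then 15 * j + 13
      else if count + 8 = N then 15 * j + 14
      else pvLoopA N fuel (count + 8) (15 * j + 16) := by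
  rw [show fuel + 15 = fuel + 14 + 1 from rfl,
      pvStepT N _ count (15 * j + 1) (by omega) (by omega)]
  by_cases h1 : count + 1 = N
  · simp [h1]
  rw [if_neg h1, if_neg h1, show (15 * j + 1 + 1 : Int) = 15 * j + 2 from by ring,
      show fuel + 14 = fuel + 13 + 1 from rfl,
      pvStepT N _ _ (15 * j + 2) (by omega) (by omega)]
  by_cases h2 : count + 1 + 1 = N
  · rw [if_pos h2, if_pos (by omega : count + 2 = N)]
  rw [if_neg h2, if_neg (by omega : ¬ count + 2 = N),
      show (15 * j + 2 + 1 : Int) = 15 * j + 3 from by ring,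
      show fuel + 13 = fuel + 12 + 1 from rfl,
      pvStepF N _ _ (15 * j + 3) (by omega),
      show (15 * j + 3 + 1 : Int) = 15 * j + 4 from by ring,
      show fuel + 12 = fuel + 11 + 1 from rfl,
      pvStepT N _ _ (15 * j + 4) (by omega) (by omega)]
  by_cases h3 : count + 1 + 1 + 1 = N
  · rw [if_pos h3, if_pos (by omega : count + 3 = N)]
  rw [if_neg h3, if_neg (by omega : ¬ count + 3 = N),
      show (15 * j + 4 + 1 : Int) = 15 * j + 5 from by ring,
      show fuel + 11 = fuel + 10 + 1 from rfl,
      pvStepF N _ _ (15 * j + 5) (by omega),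
      show (15 * j + 5 + 1 : Int) = 15 * j + 6 from by ring,
      show fuel + 10 = fuel + 9 + 1 from rfl,
      pvStepF N _ _ (15 * j + 6) (by omega),
      show (15 * j + 6 + 1 : Int) = 15 * j + 7 from by ring,
      show fuel + 9 = fuel + 8 + 1 from rfl,
      pvStepT N _ _ (15 * j + 7) (by omega) (by omega)]
  by_cases h4 : count + 1 + 1 + 1 + 1 = N
  · rw [if_pos h4, if_pos (by omega : count + 4 = N)]
  rw [if_neg h4, if_neg (by omega : ¬ count + 4 = N),
      show (15 * j + 7 + 1 : Int) = 15 * j + 8 from by ring,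
      show fuel + 8 = fuel + 7 + 1 from rfl,
      pvStepT N _ _ (15 * j + 8) (by omega) (by omega)]
  by_cases h5 : count + 1 + 1 + 1 + 1 + 1 = N
  · rw [if_pos h5, if_pos (by omega : count + 5 = N)]
  rw [if_neg h5, if_neg (by omega : ¬ count + 5 = N),
      show (15 * j + 8 + 1 : Int) = 15 * j + 9 from by ring,
      show fuel + 7 = fuel + 6 + 1 from rfl,
      pvStepF N _ _ (15 * j + 9) (by omega),
      show (15 * j + 9 + 1 : Int) = 15 * j + 10 from by ring,
      show fuel + 6 = fuel + 5 + 1 from rfl,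
      pvStepF N _ _ (15 * j + 10) (by omega),
      show (15 * j + 10 + 1 : Int) = 15 * j + 11 from by ring,
      show fuel + 5 = fuel + 4 + 1 from rfl,
      pvStepT N _ _ (15 * j + 11) (by omega) (by omega)]
  by_cases h6 : count + 1 + 1 + 1 + 1 + 1 + 1 = N
  · rw [if_pos h6, if_pos (by omega : count + 6 = N)]
  rw [if_neg h6, if_neg (by omega : ¬ count + 6 = N),
      show (15 * j + 11 + 1 : Int) = 15 * j + 12 from by ring,
      show fuel + 4 = fuel + 3 + 1 from rfl,
      pvStepF N _ _ (15 * j + 12) (by omega),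
      show (15 * j + 12 + 1 : Int) = 15 * j + 13 from by ring,
      show fuel + 3 = fuel + 2 + 1 from rfl,
      pvStepT N _ _ (15 * j + 13) (by omega) (by omega)]
  by_cases h7 : count + 1 + 1 + 1 + 1 + 1 + 1 + 1 = N
  · rw [if_pos h7, if_pos (by omega : count + 7 = N)]
  rw [if_neg h7, if_neg (by omega : ¬ count + 7 = N),
      show (15 * j + 13 + 1 : Int) = 15 * j + 14 from by ring,
      show fuel + 2 = fuel + 1 + 1 from rfl,
      pvStepT N _ _ (15 * j + 14) (by omega) (by omega)]
  by_cases h8 : count + 1 + 1 + 1 + 1 + 1 + 1 + 1 + 1 = N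
  · rw [if_pos h8, if_pos (by omega : count + 8 = N)]
  rw [if_neg h8, if_neg (by omega : ¬ count + 8 = N),
      show (15 * j + 14 + 1 : Int) = 15 * j + 15 from by ring,
      pvStepF N _ _ (15 * j + 15) (by omega),
      show (15 * j + 15 + 1 : Int) = 15 * j + 16 from by ring,
      show (count + 1 + 1 + 1 + 1 + 1 + 1 + 1 + 1 : Int) = count + 8 from by ring]

theorem pvAlt_step (d : Int) (_h : 9 ≤ d) :
    find_nth_number_alt (d - 8) + 15 = find_nth_number_alt d := by
  simp only [find_nth_number_alt]
  rw [PySem.Int.floordiv_eq_ediv_of_pos (by norm_num),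
      PySem.Int.floordiv_eq_ediv_of_pos (by norm_num),
      PySem.Int.mod_eq_emod_of_pos (by norm_num),
      PySem.Int.mod_eq_emod_of_pos (by norm_num)]
  have h1 : (d - 1) / 8 = (d - 8 - 1) / 8 + 1 := by omega
  have h2 : (d - 1) % 8 = (d - 8 - 1) % 8 := by omega
  rw [h1, h2]; ring

theorem pvLoopA_main : ∀ (m : Nat) (j : Int) (fuel : Nat) (N count : Int),
    15 * m ≤ fuel → 1 ≤ N - count → N - count ≤ 8 * m →
    pvLoopA N fuel count (15 * j + 1) = 15 * j + find_nth_number_alt (N - count) := by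
  intro m
  induction m with
  | zero => intro j fuel N count _ h1 h2; omega
  | succ m ih =>
    intro j fuel N count hfuel h1 h2
    obtain ⟨f, rfl⟩ : ∃ f, fuel = f + 15 := ⟨fuel - 15, by omega⟩
    rw [pvLoopA_period]
    by_cases hle : N - count ≤ 8
    · rcases (by omega : N - count = 1 ∨ N - count = 2 ∨ N - count = 3 ∨ N - count = 4 ∨
        N - count = 5 ∨ N - count = 6 ∨ N - count = 7 ∨ N - count = 8) with
        hd | hd | hd | hd | hd | hd | hd | hd
      · rw [if_pos (by omega), hd, (by decide : find_nth_number_alt 1 = 1)]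
      · rw [if_neg (by omega), if_pos (by omega), hd,
            (by decide : find_nth_number_alt 2 = 2)]
      · rw [if_neg (by omega), if_neg (by omega), if_pos (by omega), hd,
            (by decide : find_nth_number_alt 3 = 4)]
      · rw [if_neg (by omega), if_neg (by omega), if_neg (by omega), if_pos (by omega), hd,
            (by decide : find_nth_number_alt 4 = 7)]
      · rw [if_neg (by omega), if_neg (by omega), if_neg (by omega), if_neg (by omega),
            if_pos (by omega), hd, (by decide : find_nth_number_alt 5 = 8)]
      · rw [if_neg (by omega), if_neg (by omega), if_neg (by omega), if_neg (by omega),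
            if_neg (by omega), if_pos (by omega), hd,
            (by decide : find_nth_number_alt 6 = 11)]
      · rw [if_neg (by omega), if_neg (by omega), if_neg (by omega), if_neg (by omega),
            if_neg (by omega), if_neg (by omega), if_pos (by omega), hd,
            (by decide : find_nth_number_alt 7 = 13)]
      · rw [if_neg (by omega), if_neg (by omega), if_neg (by omega), if_neg (by omega),
            if_neg (by omega), if_neg (by omega), if_neg (by omega), if_pos (by omega), hd,
            (by decide : find_nth_number_alt 8 = 14)]
    · rw [if_neg (by omega), if_neg (by omega), if_neg (by omega), if_neg (by omega),
          if_neg (by omega), if_neg (by omega), if_neg (by omega), if_neg (by omega),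
          show (15 * j + 16 : Int) = 15 * (j + 1) + 1 from by ring,
          ih (j + 1) f N (count + 8) (by omega) (by omega) (by omega),
          show (N - (count + 8) : Int) = N - count - 8 from by ring]
      have := pvAlt_step (N - count) (by omega)
      linarith

-- ===== VERDICT (by name: the statement is the Claim_ definition above) =====
theorem find_nth_number_spec : Claim_equal_find_nth_number := by
  intro N _ hpre
  unfold Pre_find_nth_number at hpre
  unfold Spec_find_nth_number find_nth_number
  have h := pvLoopA_main (N.toNat + 1) 0 (15 * N.toNat + 15) N 0
    (by omega) (by omega) (by omega)
  rw [show (15 * (0 : Int) + 1) = 1 from by norm_num] at h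
  rw [h]; ring_nf
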